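-- pv_equiv track=rewrite | github.com/bowen0701/alg-ds-python | alg_minmax.py | find_min_max_seq
-- ===== SOURCE A (Python) =====
-- def find_min_max_seq(a_ls):
--     """Find mix & max in a list by sequential algorithm.
--
--     - Time complexity: O(n).
--     - Space complexity: O(1).
--     """
--     if a_ls[0] < a_ls[1]:
--         cur_min, cur_max = a_ls[0], a_ls[1]
--     else:
--         cur_min, cur_max = a_ls[1], a_ls[0]
--
--     for i in range(2, len(a_ls), 2):
--         if i + 1 < len(a_ls):
--             if a_ls[i] < a_ls[i + 1]:
--                 _min, _max = a_ls[i], a_ls[i + 1]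
--             else:
--                 _min, _max = a_ls[i + 1], a_ls[i]
--         else:
--             _min, _max = a_ls[i], a_ls[i]
--
--         if _min < cur_min:
--             cur_min = _min
--         if _max > cur_max:
--             cur_max = _max
--
--     return [cur_min, cur_max]
-- ===== SOURCE B (Python) =====
-- def find_min_max_seq(a_ls):
--     """Find min & max by a plain running-min/running-max scan (single-element steps)."""
--     if a_ls[0] < a_ls[1]:
--         cur_min, cur_max = a_ls[0], a_ls[1]
--     else:
--         cur_min, cur_max = a_ls[1], a_ls[0]
--
--     for x in a_ls[2:]:
--         if x < cur_min:
--             cur_min = x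
--         if x > cur_max:
--             cur_max = x
--
--     return [cur_min, cur_max]
-- ===== Notes on version B (the rewrite author's own statement) =====
-- stated objective: simpler
-- what changed: Replaced the tournament-style step-by-2 indexed loop that compares each pair (a_ls[i], a_ls[i+1]) before updating with a plain one-element-at-a-time running-min/running-max scan over the slice a_ls[2:].
import Mathlib
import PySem

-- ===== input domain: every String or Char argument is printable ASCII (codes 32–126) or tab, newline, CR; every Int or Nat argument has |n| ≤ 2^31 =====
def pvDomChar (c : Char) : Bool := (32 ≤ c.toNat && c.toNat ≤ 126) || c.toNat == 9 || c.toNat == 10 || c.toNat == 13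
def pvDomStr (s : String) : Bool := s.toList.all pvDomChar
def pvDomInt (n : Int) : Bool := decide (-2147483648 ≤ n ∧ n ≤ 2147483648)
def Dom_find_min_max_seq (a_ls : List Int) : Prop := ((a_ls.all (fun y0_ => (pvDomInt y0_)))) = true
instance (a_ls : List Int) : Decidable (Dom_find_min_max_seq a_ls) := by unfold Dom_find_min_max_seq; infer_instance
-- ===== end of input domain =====

-- B replaces A's step-by-2 pairwise (tournament) loop with a plain one-element running-min/max scan over a_ls[2:]; objective: simpler.


-- ===== PORT A =====
-- one iteration of A's step-by-2 loop: read the pair (a_ls[i], a_ls[i+1]) (or the single a_ls[i]), then update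
def pvAStep (a_ls : List Int) (s : Int × Int) (i : Int) : Int × Int :=
  let n : Int := PySem.List.len a_ls
  let p : Int × Int :=
    if i + 1 < n then
      (if PySem.List.pyGetD a_ls i 0 < PySem.List.pyGetD a_ls (i + 1) 0 then
        (PySem.List.pyGetD a_ls i 0, PySem.List.pyGetD a_ls (i + 1) 0)
      else
        (PySem.List.pyGetD a_ls (i + 1) 0, PySem.List.pyGetD a_ls i 0))
    else
      (PySem.List.pyGetD a_ls i 0, PySem.List.pyGetD a_ls i 0)
  (if p.1 < s.1 then p.1 else s.1, if p.2 > s.2 then p.2 else s.2)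

def find_min_max_seq (a_ls : List Int) : List Int :=
  let init : Int × Int :=
    if PySem.List.pyGetD a_ls 0 0 < PySem.List.pyGetD a_ls 1 0 then
      (PySem.List.pyGetD a_ls 0 0, PySem.List.pyGetD a_ls 1 0)
    else
      (PySem.List.pyGetD a_ls 1 0, PySem.List.pyGetD a_ls 0 0)
  let r := (PySem.List.pyRange 2 (PySem.List.len a_ls) 2).foldl (pvAStep a_ls) init
  [r.1, r.2]

-- ===== PORT B =====
-- one iteration of B's scan: compare the single element x with the running min and max
def pvBStep (s : Int × Int) (x : Int) : Int × Int :=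
  (if x < s.1 then x else s.1, if x > s.2 then x else s.2)

def find_min_max_seq_alt (a_ls : List Int) : List Int :=
  let init : Int × Int :=
    if PySem.List.pyGetD a_ls 0 0 < PySem.List.pyGetD a_ls 1 0 then
      (PySem.List.pyGetD a_ls 0 0, PySem.List.pyGetD a_ls 1 0)
    else
      (PySem.List.pyGetD a_ls 1 0, PySem.List.pyGetD a_ls 0 0)
  let r := (PySem.List.slice a_ls (some 2) none).foldl pvBStep init
  [r.1, r.2]

-- ===== PRECONDITION & SPEC =====
-- A unconditionally indexes the first two elements: on lists shorter than 2, Python raises IndexError (so does B)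
def Pre_find_min_max_seq (a_ls : List Int) : Prop := 2 ≤ a_ls.length
instance (a_ls : List Int) : Decidable (Pre_find_min_max_seq a_ls) := by unfold Pre_find_min_max_seq; infer_instance
def pvWitness_find_min_max_seq : List Int := [3, 1, 4, 1, 5]

def Spec_find_min_max_seq (a_ls : List Int) (out : List Int) : Prop := out = find_min_max_seq_alt a_ls
instance (a_ls : List Int) (out : List Int) : Decidable (Spec_find_min_max_seq a_ls out) := by unfold Spec_find_min_max_seq; infer_instance

-- ===== CLAIM (what is proved, stated in full; the proofs are below) =====
def Claim_equal_find_min_max_seq : Prop := ∀ (a_ls : List Int), Dom_find_min_max_seq a_ls → Pre_find_min_max_seq a_ls → Spec_find_min_max_seq a_ls (find_min_max_seq a_ls)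

-- ===== LEMMAS AND PROOFS =====

theorem if_lt_min (a m : Int) : (if a < m then a else m) = min m a := by
  split_ifs <;> omega

theorem if_gt_max (a M : Int) : (if a > M then a else M) = max M a := by
  split_ifs <;> omega

-- induction form for a step-2 range
theorem pyRange_two_cons (a b : Int) (h : a < b) :
    PySem.List.pyRange a b 2 = a :: PySem.List.pyRange (a + 2) b 2 := by
  rw [PySem.List.pyRange_of_pos a b (by norm_num),
      PySem.List.pyRange_of_pos (a + 2) b (by norm_num), if_pos h]
  have hn : ((b - a + 2 - 1) / 2).toNat
      = (if a + 2 < b then ((b - (a + 2) + 2 - 1) / 2).toNat else 0) + 1 := by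
    split_ifs <;> omega
  rw [hn, List.range_succ_eq_map, List.map_cons, List.map_map]
  congr 1
  · simp
  · apply List.map_congr_left
    intro k _
    simp only [Function.comp_apply]
    push_cast
    ring

theorem pyRange_two_nil (a b : Int) (h : b ≤ a) : PySem.List.pyRange a b 2 = [] := by
  rw [PySem.List.pyRange_of_pos a b (by norm_num)]
  simp [not_lt.mpr h]

-- B's scan accumulates the running minimum and maximum componentwise
theorem bfold (l : List Int) (m M : Int) :
    l.foldl pvBStep (m, M) = (l.foldl min m, l.foldl max M) := by
  induction l generalizing m M with
  | nil => rfl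
  | cons x xs ih =>
      simp only [List.foldl_cons, pvBStep]
      rw [if_lt_min, if_gt_max, ih]

-- A's step-2 pairwise loop over the suffix `rest` (starting at index `pre.length`)
-- also accumulates the running minimum and maximum of `rest` componentwise
theorem afold (pre rest : List Int) (m M : Int) :
    (PySem.List.pyRange (pre.length : Int) ((pre.length : Int) + rest.length) 2).foldl
        (pvAStep (pre ++ rest)) (m, M)
      = (rest.foldl min m, rest.foldl max M) := by
  match rest with
  | [] =>
      rw [pyRange_two_nil _ _ (by simp)]
      rfl
  | [x] =>
      rw [pyRange_two_cons _ _ (by simp), pyRange_two_nil _ _ (by simp)]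
      have hx : PySem.List.pyGetD (pre ++ [x]) (pre.length : Int) 0 = x := by
        simp [List.getD]
      have hc : ¬ ((pre.length : Int) + 1 < ((pre ++ [x]).length : Int)) := by simp
      simp only [List.foldl_cons, List.foldl_nil, pvAStep, PySem.List.len_eq]
      rw [if_neg hc, hx]
      dsimp only
      rw [if_lt_min, if_gt_max]
  | x :: y :: rs =>
      rw [pyRange_two_cons _ _ (by simp; omega), List.foldl_cons]
      have hstep : pvAStep (pre ++ x :: y :: rs) (m, M) (pre.length : Int)
          = (min (min m x) y, max (max M x) y) := by
        have hx : PySem.List.pyGetD (pre ++ x :: y :: rs) (pre.length : Int) 0 = x := by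
          simp [List.getD]
        have hy : PySem.List.pyGetD (pre ++ x :: y :: rs) ((pre.length : Int) + 1) 0 = y := by
          have h1 : ((pre.length : Int) + 1) = ((pre.length + 1 : Nat) : Int) := by
            push_cast; ring
          rw [h1, PySem.List.pyGetD_natCast]
          simp [List.getD]
        have hc : ((pre.length : Int) + 1 < ((pre ++ x :: y :: rs).length : Int)) := by simp
        simp only [pvAStep, PySem.List.len_eq]
        rw [if_pos hc, hx, hy]
        by_cases hxy : x < y
        · rw [if_pos hxy]
          dsimp only
          rw [if_lt_min, if_gt_max]
          refine Prod.ext ?_ ?_ <;> dsimp only <;> omega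
        · rw [if_neg hxy]
          dsimp only
          rw [if_lt_min, if_gt_max]
          refine Prod.ext ?_ ?_ <;> dsimp only <;> omega
      rw [hstep]
      have ih := afold (pre ++ [x, y]) rs (min (min m x) y) (max (max M x) y)
      have hlen : ((pre ++ [x, y]).length : Int) = (pre.length : Int) + 2 := by simp
      have hsplit : (pre ++ [x, y]) ++ rs = pre ++ x :: y :: rs := by simp
      rw [hlen, hsplit] at ih
      have harg : (pre.length : Int) + ((x :: y :: rs).length : Int)
          = (pre.length : Int) + 2 + (rs.length : Int) := by
        push_cast [List.length_cons]
        ring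
      rw [harg, ih]
      simp only [List.foldl_cons]
termination_by rest.length

-- ===== VERDICT (by name: the statement is the Claim_ definition above) =====
theorem find_min_max_seq_spec : Claim_equal_find_min_max_seq := by
  intro a_ls _ hpre
  unfold Spec_find_min_max_seq
  match a_ls, hpre with
  | a :: b :: rest, _ =>
      unfold find_min_max_seq find_min_max_seq_alt
      simp only [PySem.List.len_eq]
      have hslice : PySem.List.slice (a :: b :: rest) (some 2) none = rest := by
        have h2 : (2 : Int) = ((2 : Nat) : Int) := rfl
        rw [h2, PySem.List.slice_from_natCast]
        rfl
      rw [hslice]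
      have hshow : ∀ init : Int × Int,
          ((PySem.List.pyRange 2 (((a :: b :: rest).length : Nat) : Int) 2).foldl
              (pvAStep (a :: b :: rest)) init)
            = rest.foldl pvBStep init := by
        rintro ⟨m, M⟩
        have ih := afold [a, b] rest m M
        norm_num at ih
        have hlen : (((a :: b :: rest).length : Nat) : Int) = 2 + (rest.length : Int) := by
          push_cast [List.length_cons]
          ring
        rw [hlen, ih, bfold]
      rw [hshow]
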